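-- pv_equiv track=rewrite | github.com/navkant/ds_algo_practice | scaler/sorting/bottles.py | solve
-- ===== SOURCE A (Python) =====
-- def solve(A):
--     n = len(A)
--     visible_bottles = n
--
--     hash_map = {}
--     for i in A:
--         if i not in hash_map:
--             hash_map[i] = [1, 1]
--         else:
--             hash_map[i][0] += 1
--             hash_map[i][1] += 1
--
--     keys = sorted(list(hash_map.keys()))
--
--     for i in range(len(keys) - 1):
--         count = hash_map[keys[i]][0]
--         j = i + 1
--         while count and j < len(keys):
--             if hash_map[keys[j]][1] >= count:
--                 hash_map[keys[j]][1] -= count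
--                 visible_bottles -= count
--                 count = 0
--                 break
--             else:
--                 count -= hash_map[keys[j]][1]
--                 visible_bottles -= hash_map[keys[j]][1]
--                 hash_map[keys[j]][1] = 0
--                 j += 1
--
--     return visible_bottles
-- ===== SOURCE B (Python) =====
-- def solve(A):
--     counts = {}
--     for x in A:
--         counts[x] = counts.get(x, 0) + 1
--     best = 0
--     for c in counts.values():
--         if c > best:
--             best = c
--     return best
-- ===== Notes on version B (the rewrite author's own statement) =====
-- stated objective: faster
-- what changed: Replaces the sort plus quadratic greedy hiding simulation by a single counting pass: the number of visible bottles equals the maximum multiplicity of any value, so B just builds a counter and returns its largest count.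
import Mathlib
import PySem

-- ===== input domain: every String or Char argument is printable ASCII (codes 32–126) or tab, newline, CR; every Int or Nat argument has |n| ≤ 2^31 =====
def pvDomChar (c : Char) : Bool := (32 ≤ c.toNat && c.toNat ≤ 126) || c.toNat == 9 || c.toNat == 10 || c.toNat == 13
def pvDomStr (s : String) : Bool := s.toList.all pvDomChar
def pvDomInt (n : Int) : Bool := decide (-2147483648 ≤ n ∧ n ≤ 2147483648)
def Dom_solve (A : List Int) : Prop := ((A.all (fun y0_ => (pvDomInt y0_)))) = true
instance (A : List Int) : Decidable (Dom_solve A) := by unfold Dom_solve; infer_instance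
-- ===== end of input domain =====

-- B replaces A's sort + quadratic hiding simulation by a single counting pass returning the
-- largest multiplicity (the two agree on every input; 'faster' in a timing run's measurement).

-- ===== PORT A =====
-- building hash_map: each element i maps to the pair [count, capacity], both incremented
def solveStep (hm : PySem.Dict Int (Int × Int)) (i : Int) : PySem.Dict Int (Int × Int) :=
  if hm.contains i = false then hm.insert i (1, 1)
  else (hm.modify i (0, 0) (fun p => (p.1 + 1, p.2))).modify i (0, 0) (fun p => (p.1, p.2 + 1))

def solveBuild (A : List Int) : PySem.Dict Int (Int × Int) :=
  A.foldl solveStep PySem.Dict.empty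

-- the inner `while count and j < len(keys)` loop, as structural recursion on the keys from j on
def solveInner : Int → List Int → PySem.Dict Int (Int × Int) → Int →
    PySem.Dict Int (Int × Int) × Int
  | _, [], hm, vis => (hm, vis)
  | cnt, k :: rest, hm, vis =>
    if cnt = 0 then (hm, vis)
    else
      let cap := (hm.getD k (0, 0)).2
      if cap ≥ cnt then (hm.modify k (0, 0) (fun p => (p.1, p.2 - cnt)), vis - cnt)
      else solveInner (cnt - cap) rest (hm.modify k (0, 0) (fun p => (p.1, 0))) (vis - cap)

-- the outer `for i in range(len(keys) - 1)` loop (the last key is not processed)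
def solveOuter : List Int → PySem.Dict Int (Int × Int) → Int → Int
  | [], _, vis => vis
  | [_], _, vis => vis
  | k :: k2 :: rest, hm, vis =>
    let cnt := (hm.getD k (0, 0)).1
    let p := solveInner cnt (k2 :: rest) hm vis
    solveOuter (k2 :: rest) p.1 p.2

def solve (A : List Int) : Int :=
  let hm := solveBuild A
  let keys := PySem.List.sorted hm.keys (fun x => x) false
  solveOuter keys hm (A.length : Int)

-- ===== PORT B =====
def solve_alt (A : List Int) : Int :=
  let counts := A.foldl (fun d x => d.insert x (d.getD x 0 + 1)) PySem.Dict.empty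
  counts.values.foldl (fun best c => if c > best then c else best) 0

-- ===== PRECONDITION & SPEC =====
def Spec_solve (A : List Int) (out : Int) : Prop := out = solve_alt A
instance (A : List Int) (out : Int) : Decidable (Spec_solve A out) := by unfold Spec_solve; infer_instance

-- ===== CLAIM (what is proved, stated in full; the proofs are below) =====
def Claim_equal_solve : Prop := ∀ (A : List Int), Dom_solve A → Spec_solve A (solve A)

-- ===== LEMMAS AND PROOFS =====

-- Abstract model of the capacity state: after absorbing a surplus s into the count list t,
-- capsFn s t is the list of remaining capacities.
def capsFn : Int → List Int → List Int
  | _, [] => []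
  | s, c :: t => (c - min c s) :: capsFn (s - min c s) t

-- Abstract model of the inner loop on a list of capacities: (absorbed, new capacities).
def drainFn : Int → List Int → Int × List Int
  | _, [] => (0, [])
  | cnt, r :: rs =>
    if cnt = 0 then (0, r :: rs)
    else if r ≥ cnt then (cnt, (r - cnt) :: rs)
    else
      let p := drainFn (cnt - r) rs
      (r + p.1, 0 :: p.2)

lemma drain_caps (t : List Int) : ∀ (s c : Int), 0 ≤ s → 0 ≤ c → (∀ x ∈ t, 0 ≤ x) →
    drainFn c (capsFn s t) = ((capsFn s t).sum - (capsFn (s + c) t).sum, capsFn (s + c) t) := by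
  induction t with
  | nil => intro s c hs hc _; simp [capsFn, drainFn]
  | cons g t ih =>
    intro s c hs hc hx
    have hg : 0 ≤ g := hx g (by simp)
    have hxt : ∀ x ∈ t, 0 ≤ x := fun x hx' => hx x (by simp [hx'])
    by_cases hc0 : c = 0
    · subst hc0; simp [capsFn, drainFn]
    · simp only [capsFn, drainFn, if_neg hc0]
      by_cases hr : g - min g s ≥ c
      · rw [if_pos hr]
        have h1 : min g s = s := by omega
        have h2 : min g (s + c) = s + c := by omega
        have h3 : s - min g s = 0 := by omega
        have h4 : s + c - min g (s + c) = 0 := by omega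
        rw [h3, h4, h1, h2]
        refine Prod.ext ?_ ?_
        · simp
          try ring_nf
        · simp
          try ring_nf
      · rw [if_neg hr]
        have hs' : 0 ≤ s - min g s := by omega
        have hc' : 0 ≤ c - (g - min g s) := by omega
        have := ih (s - min g s) (c - (g - min g s)) hs' hc' hxt
        rw [this]
        have hkey : s - min g s + (c - (g - min g s)) = s + c - min g (s + c) := by omega
        have hfront : g - min g (s + c) = 0 := by omega
        rw [hkey]
        refine Prod.ext ?_ ?_ <;> simp [hfront] <;> ring_nf

lemma caps_zero (t : List Int) (h : ∀ x ∈ t, 0 ≤ x) : capsFn 0 t = t := by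
  induction t with
  | nil => simp [capsFn]
  | cons c t ih =>
    have hc : 0 ≤ c := h c (by simp)
    have h1 : min c 0 = 0 := by omega
    simp [capsFn, h1, ih fun x hx => h x (by simp [hx])]

lemma inner_spec : ∀ (ks : List Int) (cnt : Int) (hm : PySem.Dict Int (Int × Int)) (vis : Int),
    ks.Nodup →
    (solveInner cnt ks hm vis).2
        = vis - (drainFn cnt (ks.map (fun k => (hm.getD k (0, 0)).2))).1 ∧
    (ks.map (fun k => ((solveInner cnt ks hm vis).1.getD k (0, 0)).2))
        = (drainFn cnt (ks.map (fun k => (hm.getD k (0, 0)).2))).2 ∧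
    (∀ k', ((solveInner cnt ks hm vis).1.getD k' (0, 0)).1 = (hm.getD k' (0, 0)).1) ∧
    (∀ k', k' ∉ ks → ((solveInner cnt ks hm vis).1.getD k' (0, 0)).2 = (hm.getD k' (0, 0)).2) := by
  intro ks
  induction ks with
  | nil =>
    intro cnt hm vis _
    exact ⟨by simp [solveInner, drainFn], rfl, fun k' => rfl, fun k' _ => rfl⟩
  | cons k rest ih =>
    intro cnt hm vis hnd
    have hk : k ∉ rest := (List.nodup_cons.mp hnd).1
    have hnd' : rest.Nodup := (List.nodup_cons.mp hnd).2
    by_cases hc : cnt = 0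
    · subst hc
      exact ⟨by simp [solveInner, drainFn], by simp [solveInner, drainFn],
        fun k' => by simp [solveInner], fun k' _ => by simp [solveInner]⟩
    · by_cases hge : (hm.getD k (0, 0)).2 ≥ cnt
      · have hres : solveInner cnt (k :: rest) hm vis
            = (hm.modify k (0, 0) (fun p => (p.1, p.2 - cnt)), vis - cnt) := by
          simp [solveInner, hc, hge]
        have hdr : drainFn cnt ((k :: rest).map (fun k => (hm.getD k (0, 0)).2))
            = (cnt, ((hm.getD k (0, 0)).2 - cnt) :: rest.map (fun k => (hm.getD k (0, 0)).2)) := by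
          simp [drainFn, hc, hge]
        rw [hres, hdr]
        refine ⟨rfl, ?_, ?_, ?_⟩
        · simp only [List.map_cons, PySem.Dict.getD_modify]
          refine congrArg₂ _ rfl ?_
          refine List.map_congr_left fun k' hk' => ?_
            
          have hne : k' ≠ k := fun h => hk (h ▸ hk')
          rw [if_neg hne]
        · intro k'
          rw [PySem.Dict.getD_modify]
          split
          · next h => rw [h]
          · rfl
        · intro k' hk'
          have hne : k' ≠ k := fun h => hk' (by rw [h]; exact List.mem_cons_self ..)
          rw [PySem.Dict.getD_modify, if_neg hne]
      · have hres : solveInner cnt (k :: rest) hm vis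
            = solveInner (cnt - (hm.getD k (0, 0)).2) rest
                (hm.modify k (0, 0) (fun p => (p.1, 0))) (vis - (hm.getD k (0, 0)).2) := by
          simp [solveInner, hc, hge]
        set hm₂ := hm.modify k (0, 0) (fun p => (p.1, 0)) with hm₂def
        have hmap : rest.map (fun k' => (hm₂.getD k' (0, 0)).2)
            = rest.map (fun k' => (hm.getD k' (0, 0)).2) :=
          List.map_congr_left fun k' hk' => by
            have hne : k' ≠ k := fun h => hk (h ▸ hk')
            rw [hm₂def, PySem.Dict.getD_modify, if_neg hne]
        obtain ⟨ih1, ih2, ih3, ih4⟩ := ih (cnt - (hm.getD k (0, 0)).2) hm₂ (vis - (hm.getD k (0, 0)).2) hnd'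
        have hdr : drainFn cnt ((k :: rest).map (fun k => (hm.getD k (0, 0)).2))
            = ((hm.getD k (0, 0)).2
                + (drainFn (cnt - (hm.getD k (0, 0)).2) (rest.map (fun k => (hm.getD k (0, 0)).2))).1,
               0 :: (drainFn (cnt - (hm.getD k (0, 0)).2) (rest.map (fun k => (hm.getD k (0, 0)).2))).2) := by
          simp [drainFn, hc, hge]
        rw [hres, hdr]
        refine ⟨?_, ?_, ?_, ?_⟩
        · rw [ih1, hmap]; ring
        · simp only [List.map_cons]
          refine congrArg₂ _ ?_ ?_
          · rw [ih4 k hk, hm₂def, PySem.Dict.getD_modify, if_pos rfl]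
          · rw [ih2, hmap]
        · intro k'
          rw [ih3 k', hm₂def, PySem.Dict.getD_modify]
          split
          · next h => rw [h]
          · rfl
        · intro k' hk'
          have hne : k' ≠ k := fun h => hk' (by rw [h]; exact List.mem_cons_self ..)
          rw [ih4 k' (fun h => hk' (List.mem_cons_of_mem _ h)), hm₂def, PySem.Dict.getD_modify,
            if_neg hne]

lemma outer_spec : ∀ (ks : List Int) (hm : PySem.Dict Int (Int × Int)) (M vis : Int),
    ks.Nodup → 0 ≤ M →
    (∀ k ∈ ks, 0 ≤ (hm.getD k (0, 0)).1) →
    (ks.map (fun k => (hm.getD k (0, 0)).2))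
      = capsFn M (ks.map (fun k => (hm.getD k (0, 0)).1)) →
    vis = M + (capsFn M (ks.map (fun k => (hm.getD k (0, 0)).1))).sum →
    solveOuter ks hm vis = (ks.map (fun k => (hm.getD k (0, 0)).1)).foldl max M := by
  intro ks
  induction ks with
  | nil =>
    intro hm M vis _ _ _ _ hvis
    simp [solveOuter, capsFn] at hvis ⊢
    omega
  | cons k rest ih =>
    intro hm M vis hnd hM hpos hcaps hvis
    have hk : k ∉ rest := (List.nodup_cons.mp hnd).1
    have hnd' : rest.Nodup := (List.nodup_cons.mp hnd).2
    cases rest with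
    | nil =>
      simp only [solveOuter, List.map_cons, List.map_nil, List.foldl_cons, List.foldl_nil]
      simp only [List.map_cons, List.map_nil, capsFn, List.sum_cons, List.sum_nil] at hvis
      omega
    | cons k2 rest2 =>
      have hc2 : (k2 :: rest2).map (fun k' => (hm.getD k' (0, 0)).2)
          = capsFn (M - min (hm.getD k (0, 0)).1 M)
              ((k2 :: rest2).map (fun k' => (hm.getD k' (0, 0)).1)) :=
        congrArg List.tail hcaps
      obtain ⟨in1, in2, in3, in4⟩ :=
        inner_spec (k2 :: rest2) ((hm.getD k (0, 0)).1) hm vis hnd'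
      have hposc : 0 ≤ (hm.getD k (0, 0)).1 := hpos k (by simp)
      have hpost : ∀ x ∈ (k2 :: rest2).map (fun k' => (hm.getD k' (0, 0)).1), 0 ≤ x := by
        intro x hx
        obtain ⟨k', hk', rfl⟩ := List.mem_map.mp hx
        exact hpos k' (List.mem_cons_of_mem _ hk')
      have hdc := drain_caps ((k2 :: rest2).map (fun k' => (hm.getD k' (0, 0)).1))
        (M - min (hm.getD k (0, 0)).1 M) ((hm.getD k (0, 0)).1) (by omega) hposc hpost
      have hMc : M - min (hm.getD k (0, 0)).1 M + (hm.getD k (0, 0)).1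
          = max M (hm.getD k (0, 0)).1 := by omega
      rw [hc2] at in1 in2
      rw [hdc, hMc] at in1 in2
      have hrun : solveOuter (k :: k2 :: rest2) hm vis
          = solveOuter (k2 :: rest2)
              (solveInner ((hm.getD k (0, 0)).1) (k2 :: rest2) hm vis).1
              (solveInner ((hm.getD k (0, 0)).1) (k2 :: rest2) hm vis).2 := rfl
      set hm₁ := (solveInner ((hm.getD k (0, 0)).1) (k2 :: rest2) hm vis).1 with hm₁def
      have hfst : (k2 :: rest2).map (fun k' => (hm₁.getD k' (0, 0)).1)
          = (k2 :: rest2).map (fun k' => (hm.getD k' (0, 0)).1) :=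
        List.map_congr_left fun k' _ => in3 k'
      have hsnd : (k2 :: rest2).map (fun k' => (hm₁.getD k' (0, 0)).2)
          = capsFn (max M (hm.getD k (0, 0)).1)
              ((k2 :: rest2).map (fun k' => (hm.getD k' (0, 0)).1)) := in2
      have hvis2 : vis = M + (((hm.getD k (0, 0)).1 - min (hm.getD k (0, 0)).1 M)
          :: capsFn (M - min (hm.getD k (0, 0)).1 M)
              ((k2 :: rest2).map (fun k' => (hm.getD k' (0, 0)).1))).sum := hvis
      rw [List.sum_cons] at hvis2
      have hvis' : (solveInner ((hm.getD k (0, 0)).1) (k2 :: rest2) hm vis).2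
          = max M (hm.getD k (0, 0)).1
            + (capsFn (max M (hm.getD k (0, 0)).1)
                ((k2 :: rest2).map (fun k' => (hm.getD k' (0, 0)).1))).sum := by
        rw [in1]
        omega
      rw [hrun]
      rw [ih hm₁ (max M (hm.getD k (0, 0)).1) _ hnd' (by omega)
        (by intro k' hk'; rw [in3 k']; exact hpos k' (List.mem_cons_of_mem _ hk'))
        (by rw [hfst, hsnd]) (by rw [hfst]; exact hvis')]
      rw [hfst]
      simp [List.foldl_cons]

lemma build_aux : ∀ (l : List Int) (hm : PySem.Dict Int (Int × Int)) (f : Int → Int),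
    (∀ k, 0 ≤ f k) →
    (∀ k, hm.contains k = decide (f k ≠ 0)) →
    (∀ k, hm.getD k (0, 0) = (f k, f k)) →
    (∀ k, (l.foldl solveStep hm).contains k = decide (f k + (l.count k : Int) ≠ 0)) ∧
    (∀ k, (l.foldl solveStep hm).getD k (0, 0)
        = (f k + (l.count k : Int), f k + (l.count k : Int))) := by
  intro l
  induction l with
  | nil =>
    intro hm f h0 hcont hgetD
    exact ⟨fun k => by simpa using hcont k, fun k => by simpa using hgetD k⟩
  | cons x t ih =>
    intro hm f h0 hcont hgetD
    have harith : ∀ k : Int, (if k = x then f k + 1 else f k) + (t.count k : Int)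
        = f k + ((x :: t).count k : Int) := by
      intro k
      rw [List.count_cons]
      by_cases hkx : k = x <;> simp [hkx] <;> omega
    have hstepOk : ∀ (hm' : PySem.Dict Int (Int × Int)),
        hm' = solveStep hm x →
        (∀ k, hm'.contains k = decide ((if k = x then f k + 1 else f k) ≠ 0)) ∧
        (∀ k, hm'.getD k (0, 0)
            = ((if k = x then f k + 1 else f k), (if k = x then f k + 1 else f k))) := by
      intro hm' hdef
      by_cases hx : hm.contains x = false
      · have hfx : f x = 0 := by
          have h := hcont x
          rw [hx] at h
          simpa using h.symm
        have hdef' : hm' = hm.insert x (1, 1) := by rw [hdef]; simp [solveStep, hx]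
        subst hdef'
        constructor
        · intro k
          rw [PySem.Dict.contains_insert]
          by_cases hkx : k = x
          · simp [hkx, hfx]
          · simp [hkx, hcont k, beq_iff_eq]
        · intro k
          rw [PySem.Dict.getD_insert]
          by_cases hkx : k = x
          · simp [hkx, hfx]
          · simp [hkx, hgetD k]
      · have hx' : hm.contains x = true := by revert hx; cases hm.contains x <;> simp
        have hfx : f x ≠ 0 := by
          have h := hcont x
          rw [hx'] at h
          simpa using h.symm
        have hdef' : hm' = (hm.modify x (0, 0) (fun p => (p.1 + 1, p.2))).modify x (0, 0)
            (fun p => (p.1, p.2 + 1)) := by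
          rw [hdef]; simp [solveStep, hx']
        subst hdef'
        constructor
        · intro k
          rw [PySem.Dict.contains_modify, PySem.Dict.contains_modify]
          by_cases hkx : k = x
          · have h1 := h0 x
            simp [hkx]
            omega
          · simp [hkx, hcont k, beq_iff_eq]
        · intro k
          rw [PySem.Dict.getD_modify, PySem.Dict.getD_modify]
          by_cases hkx : k = x
          · simp [hkx, hgetD]
          · simp [PySem.Dict.getD_modify, hkx, hgetD k]
    obtain ⟨sc, sg⟩ := hstepOk (solveStep hm x) rfl
    obtain ⟨c1, c2⟩ := ih (solveStep hm x) (fun k => if k = x then f k + 1 else f k)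
      (fun k => by
        by_cases hkx : k = x
        · have := h0 x
          simp [hkx]
          omega
        · simpa [hkx] using h0 k) sc sg
    constructor
    · intro k
      rw [List.foldl_cons, c1 k]
      rw [show ((if k = x then f k + 1 else f k) + (t.count k : Int)) = f k + ((x :: t).count k : Int)
        from harith k]
    · intro k
      rw [List.foldl_cons, c2 k, harith k]

lemma build_getD (A : List Int) (k : Int) :
    (solveBuild A).getD k (0, 0) = ((A.count k : Int), (A.count k : Int)) := by
  have h := (build_aux A PySem.Dict.empty (fun _ => 0) (fun _ => le_refl 0)
    (fun k => by simp [PySem.Dict.contains_empty]) (fun k => by simp [PySem.Dict.getD_empty])).2 k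
  simpa using h

lemma build_contains (A : List Int) (k : Int) :
    (solveBuild A).contains k = decide (k ∈ A) := by
  have h := (build_aux A PySem.Dict.empty (fun _ => 0) (fun _ => le_refl 0)
    (fun k => by simp [PySem.Dict.contains_empty]) (fun k => by simp [PySem.Dict.getD_empty])).1 k
  simp only [zero_add] at h
  unfold solveBuild
  rw [h]
  simp only [decide_eq_decide, ← List.count_pos_iff]
  omega

lemma foldl_step_nodup_keys : ∀ (l : List Int) (hm : PySem.Dict Int (Int × Int)),
    hm.keys.Nodup → (l.foldl solveStep hm).keys.Nodup := by
  intro l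
  induction l with
  | nil => intro hm h; simpa using h
  | cons x t ih =>
    intro hm h
    rw [List.foldl_cons]
    refine ih _ ?_
    unfold solveStep
    split
    · exact PySem.Dict.nodup_keys_insert _ _ _ h
    · rw [PySem.Dict.keys_modify]
      apply PySem.Dict.nodup_keys_insert
      rw [PySem.Dict.keys_modify]
      exact PySem.Dict.nodup_keys_insert _ _ _ h

lemma build_nodup_keys (A : List Int) : (solveBuild A).keys.Nodup := by
  refine foldl_step_nodup_keys A PySem.Dict.empty ?_
  rw [PySem.Dict.keys_empty]
  exact List.nodup_nil

lemma foldl_max_perm {l₁ l₂ : List Int} (h : l₁.Perm l₂) : ∀ b, l₁.foldl max b = l₂.foldl max b := by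
  induction h with
  | nil => intro b; rfl
  | cons x _ ih => intro b; simp [List.foldl_cons, ih]
  | swap x y l => intro b; simp [List.foldl_cons]; rw [show max y x = max x y from max_comm y x]
  | trans _ _ ih₁ ih₂ => intro b; rw [ih₁, ih₂]

lemma foldl_ite_max : ∀ (l : List Int) (b : Int),
    l.foldl (fun best c => if c > best then c else best) b = l.foldl max b := by
  intro l
  induction l with
  | nil => intro b; rfl
  | cons c t ih =>
    intro b
    have h : (if c > b then c else b) = max b c := by split_ifs <;> omega
    simp only [List.foldl_cons, h, ih]

lemma sum_map_cast (g : Int → Nat) : ∀ (l : List Int),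
    (l.map (fun k => ((g k : Int)))).sum = ((l.map g).sum : Int) := by
  intro l
  induction l with
  | nil => simp
  | cons x t ih => simp [ih]

lemma solve_eq_foldl_max (A : List Int) :
    solve A = ((PySem.Set.ofList A).map (fun k => ((A.count k : Int)))).foldl max 0 := by
  unfold solve
  set hm := solveBuild A with hmdef
  set ks := PySem.List.sorted hm.keys (fun x => x) false with ksdef
  have hknd : ks.Nodup :=
    ((PySem.List.sorted_perm hm.keys (fun x => x) false).nodup_iff).mpr (build_nodup_keys A)
  have hmem : ∀ k, k ∈ ks ↔ k ∈ A := by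
    intro k
    rw [ksdef, PySem.List.mem_sorted, ← PySem.Dict.contains_iff_mem_keys, hmdef, build_contains]
    simp
  have hfst : ks.map (fun k => (hm.getD k (0, 0)).1) = ks.map (fun k => ((A.count k : Int))) :=
    List.map_congr_left fun k _ => by rw [hmdef, build_getD]
  have hsnd : ks.map (fun k => (hm.getD k (0, 0)).2) = ks.map (fun k => ((A.count k : Int))) :=
    List.map_congr_left fun k _ => by rw [hmdef, build_getD]
  have hnn : ∀ x ∈ ks.map (fun k => ((A.count k : Int))), 0 ≤ x := by
    intro x hx
    obtain ⟨k, _, rfl⟩ := List.mem_map.mp hx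
    exact Int.natCast_nonneg _
  have hperm : ks.Perm (PySem.Set.ofList A) := by
    rw [List.perm_ext_iff_of_nodup hknd (PySem.Set.nodup_ofList A)]
    intro a
    rw [hmem a, PySem.Set.mem_ofList]
  have hperm2 : (PySem.Set.ofList A).Perm A.dedup := by
    rw [List.perm_ext_iff_of_nodup (PySem.Set.nodup_ofList A) A.nodup_dedup]
    intro a
    rw [PySem.Set.mem_ofList, List.mem_dedup]
  have hlen : (A.length : Int) = 0 + (capsFn 0 (ks.map (fun k => (hm.getD k (0, 0)).1))).sum := by
    rw [hfst, caps_zero _ hnn, zero_add]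
    have h1 : (ks.map (fun k => ((A.count k : Int)))).sum
        = ((PySem.Set.ofList A).map (fun k => ((A.count k : Int)))).sum :=
      (hperm.map _).sum_eq
    have h2 : ((PySem.Set.ofList A).map (fun k => ((A.count k : Int)))).sum
        = (A.dedup.map (fun k => ((A.count k : Int)))).sum := (hperm2.map _).sum_eq
    rw [h1, h2, sum_map_cast (fun k => A.count k) A.dedup,
      List.sum_map_count_dedup_eq_length]
  rw [outer_spec ks hm 0 (A.length : Int) hknd (le_refl 0)
      (by intro k _; rw [hmdef, build_getD]; exact Int.natCast_nonneg _)
      (by rw [hsnd, hfst, caps_zero _ hnn]) hlen]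
  rw [hfst]
  exact foldl_max_perm (hperm.map _) 0

lemma alt_eq_foldl_max (A : List Int) :
    solve_alt A = ((PySem.Set.ofList A).map (fun k => ((A.count k : Int)))).foldl max 0 := by
  have h0 : solve_alt A = List.foldl (fun best c => if c > best then c else best) 0
      (PySem.Dict.counter A).values := by
    unfold solve_alt
    rw [PySem.Dict.foldl_insert_getD_add_one_eq_counter]
  rw [h0,
    PySem.Dict.values_eq_map_keys _ (PySem.Dict.nodup_keys_counter A) (0 : Int),
    foldl_ite_max, PySem.Dict.keys_counter]
  refine congrArg (fun l => List.foldl max 0 l) ?_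
  exact List.map_congr_left fun k _ => PySem.Dict.getD_counter A k

-- ===== VERDICT (by name: the statement is the Claim_ definition above) =====
theorem solve_spec : Claim_equal_solve := by
  intro A _
  unfold Spec_solve
  rw [solve_eq_foldl_max, alt_eq_foldl_max]
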